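-- pv_equiv track=rewrite | github.com/posl/comment_recommendation | script/split_gen/3_time/zh/100_C/3.py | solve
-- ===== SOURCE A (Python) =====
-- def solve(N, A):
--     cnt = 0
--     while True:
--         for i in range(N):
--             if A[i] % 2 == 0:
--                 A[i] //= 2
--             else:
--                 return cnt
--         cnt += 1
-- ===== SOURCE B (Python) =====
-- def solve(N, A):
--     # One pass: the answer is the minimum 2-adic valuation among the first N elements
--     # (A instead repeatedly halves all of them in place until one turns odd).
--     best = None
--     for a in A[:N]:
--         if a != 0:
--             v = 0
--             while a % 2 == 0:
--                 a //= 2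
--                 v += 1
--             if best is None or v < best:
--                 best = v
--     return best
-- ===== Notes on version B (the rewrite author's own statement) =====
-- stated objective: alternative
-- what changed: Instead of repeatedly sweeping the whole list and halving every element in place until some element turns odd, B makes one pass over A[:N] computing each element's trailing-zero count (2-adic valuation) and returns the minimum; B does not mutate A.
import Mathlib
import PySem

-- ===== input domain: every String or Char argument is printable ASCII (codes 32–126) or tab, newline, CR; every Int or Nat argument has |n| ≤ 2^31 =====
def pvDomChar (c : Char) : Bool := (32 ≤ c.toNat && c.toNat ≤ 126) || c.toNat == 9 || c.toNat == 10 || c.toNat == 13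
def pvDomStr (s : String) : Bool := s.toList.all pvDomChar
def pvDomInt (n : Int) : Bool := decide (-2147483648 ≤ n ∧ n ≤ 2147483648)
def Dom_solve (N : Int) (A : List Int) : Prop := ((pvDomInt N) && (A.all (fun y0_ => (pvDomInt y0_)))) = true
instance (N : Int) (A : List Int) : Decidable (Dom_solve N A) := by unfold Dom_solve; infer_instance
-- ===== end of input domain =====

-- B replaces A's repeated whole-list halving sweeps by a single pass taking the minimum
-- trailing-zero count (2-adic valuation) of the scanned elements; equivalence is about the
-- RETURN value only (Python A halves the list's elements in place, B does not mutate A).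

-- ===== PORT A =====
-- one 'for i in range(N)' sweep: halves every even A[i] in place, returns none at the first
-- odd element (Python's 'return cnt').  In-range reads/writes are exact; an out-of-range A[i]
-- is Python's IndexError, excluded by Pre_solve (the port reads a default there).
def solveOnePass (A : List Int) (N i : Nat) : Option (List Int) :=
  if i < N then
    let a := (PySem.List.pyGet? A (i : Int)).getD 0
    if PySem.Int.mod a 2 = 0 then
      solveOnePass (A.set i (PySem.Int.floordiv a 2)) N (i + 1)
    else none
  else some A
termination_by N - i

-- the 'while True' loop with counter cnt; the fuel only makes the recursion total: inside
-- Pre_solve ∩ Dom_solve the loop returns long before the fuel runs out (proved below).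
def solveGo (fuel : Nat) (N : Nat) (A : List Int) (cnt : Int) : Int :=
  match fuel with
  | 0 => cnt
  | f + 1 =>
    match solveOnePass A N 0 with
    | none => cnt
    | some A' => solveGo f N A' (cnt + 1)

def solve (N : Int) (A : List Int) : Int := solveGo (2 ^ 40) N.toNat A 0

-- ===== PORT B =====
-- 'while a % 2 == 0: a //= 2; v += 1' — the fuel only makes it total (Python loops forever on
-- a = 0; B only runs it on a ≠ 0, where it stops after at most |a| halvings).
def v2Loop (fuel : Nat) (a : Int) (v : Int) : Int :=
  match fuel with
  | 0 => v
  | f + 1 =>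
    if PySem.Int.mod a 2 = 0 then v2Loop f (PySem.Int.floordiv a 2) (v + 1) else v

-- single fold over A[:N] keeping the least trailing-zero count seen; Python's 'return best'
-- returns None when no nonzero element was scanned — outside Pre_solve; the port maps it to 0.
def solve_alt (N : Int) (A : List Int) : Int :=
  ((PySem.List.slice A none (some N)).foldl
    (fun best a =>
      if a ≠ 0 then
        let v := v2Loop (2 ^ 40) a 0
        match best with
        | none => some v
        | some b => if v < b then some v else some b
      else best)
    (none : Option Int)).getD 0

-- ===== PRECONDITION & SPEC =====
-- Pre_solve excludes exactly the inputs on which Python A does not return: it loops forever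
-- when N ≤ 0 (the inner for-loop is empty) or when no odd element ever stops the sweeps
-- (all scanned elements 0), and raises IndexError when N exceeds the list length and the
-- sweep runs off the end before reaching an odd element.
def Pre_solve (N : Int) (A : List Int) : Prop :=
  1 ≤ N ∧
    ((N ≤ (A.length : Int) ∧ ∃ a ∈ A.take N.toNat, a ≠ 0) ∨
      ((A.length : Int) < N ∧ ∃ a ∈ A, ¬ (2 ∣ a)))
instance (N : Int) (A : List Int) : Decidable (Pre_solve N A) := by
  unfold Pre_solve; infer_instance

def pvWitness_solve : Int × List Int := (2, [4, 6])

def Spec_solve (N : Int) (A : List Int) (out : Int) : Prop := out = solve_alt N A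
instance (N : Int) (A : List Int) (out : Int) : Decidable (Spec_solve N A out) := by
  unfold Spec_solve; infer_instance

-- ===== CLAIM (what is proved, stated in full; the proofs are below) =====
def Claim_equal_solve : Prop :=
  ∀ (N : Int) (A : List Int), Dom_solve N A → Pre_solve N A → Spec_solve N A (solve N A)

-- ===== LEMMAS AND PROOFS =====
def nv2 (n : Nat) : Nat :=
  if h : n ≠ 0 ∧ n % 2 = 0 then nv2 (n / 2) + 1 else 0
termination_by n
decreasing_by exact Nat.div_lt_self (Nat.pos_of_ne_zero h.1) (by omega)

def iv2 (a : Int) : Int := (nv2 a.natAbs : Int)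

def pvHalve (a : Int) : Int := PySem.Int.floordiv a 2

def vList (N : Nat) (A : List Int) : List Int := ((A.take N).filter (fun a => a ≠ 0)).map iv2

def oMin (acc : Option Int) (v : Int) : Option Int :=
  match acc with
  | none => some v
  | some b => if v < b then some v else some b

def minO (l : List Int) (acc : Option Int) : Option Int := l.foldl oMin acc

theorem mod_two_zero_iff (a : Int) : PySem.Int.mod a 2 = 0 ↔ a.natAbs % 2 = 0 := by
  rw [PySem.Int.mod_eq_emod_of_pos (by omega)]; omega

theorem halve_natAbs {a : Int} (h : a.natAbs % 2 = 0) :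
    (PySem.Int.floordiv a 2).natAbs = a.natAbs / 2 := by
  rw [PySem.Int.floordiv_eq_ediv_of_pos (by omega)]
  obtain ⟨k, hk⟩ : (2:Int) ∣ a := by omega
  subst hk; rw [Int.mul_ediv_cancel_left _ (by omega)]; simp [Int.natAbs_mul]

theorem halve_ne_zero {a : Int} (ha : a ≠ 0) (h : a.natAbs % 2 = 0) :
    PySem.Int.floordiv a 2 ≠ 0 := by
  rw [PySem.Int.floordiv_eq_ediv_of_pos (by omega)]
  obtain ⟨k, hk⟩ : (2:Int) ∣ a := by omega
  subst hk; rw [Int.mul_ediv_cancel_left _ (by omega)]; simpa using ha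

theorem nv2_odd {n : Nat} (h : ¬ n % 2 = 0) : nv2 n = 0 := by
  rw [nv2]; simp [h]

theorem nv2_even {n : Nat} (h0 : n ≠ 0) (h2 : n % 2 = 0) : nv2 n = nv2 (n / 2) + 1 := by
  rw [nv2]; simp [h0, h2]

theorem nv2_le (n : Nat) : nv2 n ≤ n := by
  induction n using Nat.strong_induction_on with
  | _ n ih =>
    rw [nv2]
    split
    · next h => have := ih (n/2) (Nat.div_lt_self (Nat.pos_of_ne_zero h.1) (by omega)); omega
    · omega

theorem iv2_even {a : Int} (ha : a ≠ 0) (h : a.natAbs % 2 = 0) :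
    iv2 (PySem.Int.floordiv a 2) = iv2 a - 1 := by
  unfold iv2
  rw [halve_natAbs h, nv2_even (by omega) h]
  push_cast; ring

theorem iv2_odd {a : Int} (h : ¬ a.natAbs % 2 = 0) : iv2 a = 0 := by
  unfold iv2; rw [nv2_odd h]; rfl

theorem iv2_nonneg (a : Int) : 0 ≤ iv2 a := by unfold iv2; positivity

theorem v2Loop_eq (f : Nat) (a : Int) (v : Int) (ha : a ≠ 0) (hf : nv2 a.natAbs < f) :
    v2Loop f a v = v + iv2 a := by
  induction f generalizing a v with
  | zero => omega
  | succ f ih =>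
    rw [v2Loop]
    by_cases h : a.natAbs % 2 = 0
    · rw [if_pos ((mod_two_zero_iff a).2 h)]
      rw [ih _ _ (halve_ne_zero ha h)]
      · rw [iv2_even ha h]; ring
      · have := nv2_even (n := a.natAbs) (by omega) h
        rw [halve_natAbs h]; omega
    · rw [if_neg (by rw [mod_two_zero_iff]; exact h), iv2_odd h]; ring

theorem minO_isSome (l : List Int) (b : Int) : (minO l (some b)).isSome := by
  induction l generalizing b with
  | nil => simp [minO]
  | cons a l ih => simp only [minO, List.foldl_cons, oMin]; split <;> exact ih _

theorem minO_mem (l : List Int) (acc : Option Int) (m : Int)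
    (h : minO l acc = some m) : m ∈ l ∨ acc = some m := by
  induction l generalizing acc with
  | nil => right; simpa [minO] using h
  | cons a l ih =>
    rcases ih (oMin acc a) h with h' | h'
    · left; simp [h']
    · match acc with
      | none =>
        simp only [oMin, Option.some.injEq] at h'
        left; simp [h']
      | some b =>
        simp only [oMin] at h'
        split at h'
        · simp only [Option.some.injEq] at h'
          left; simp [h']
        · right; exact h'

theorem minO_le (l : List Int) (acc : Option Int) (m : Int)
    (h : minO l acc = some m) : (∀ x ∈ l, m ≤ x) ∧ (∀ b, acc = some b → m ≤ b) := by
  induction l generalizing acc with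
  | nil =>
    refine ⟨by simp, ?_⟩
    intro b hb; rw [hb] at h; simp [minO] at h; omega
  | cons a l ih =>
    obtain ⟨h1, h2⟩ := ih (oMin acc a) h
    have hma : m ≤ a := by
      match acc with
      | none => exact h2 a rfl
      | some b =>
        by_cases hab : a < b
        · exact h2 a (by simp [oMin, hab])
        · have := h2 b (by simp [oMin, hab]); omega
    constructor
    · intro x hx
      rcases List.mem_cons.1 hx with rfl | hx
      · exact hma
      · exact h1 x hx
    · intro b hb
      subst hb
      by_cases hab : a < b
      · have := h2 a (by simp [oMin, hab]); omega
      · exact h2 b (by simp [oMin, hab])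

theorem minO_map_sub_one (l : List Int) (acc : Option Int) :
    minO (l.map (fun x => x - 1)) (acc.map (fun x => x - 1)) = (minO l acc).map (fun x => x - 1) := by
  induction l generalizing acc with
  | nil => simp [minO]
  | cons a l ih =>
    simp only [List.map_cons, minO, List.foldl_cons] at *
    have : oMin (acc.map (fun x => x - 1)) (a - 1) = (oMin acc a).map (fun x => x - 1) := by
      match acc with
      | none => rfl
      | some b =>
        simp only [oMin, Option.map_some]
        by_cases hab : a < b
        · rw [if_pos (by omega), if_pos hab]; rfl
        · rw [if_neg (by omega), if_neg hab]; rfl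
    rw [this, ih]

theorem minO_some_of_ne_nil {l : List Int} (h : l ≠ []) : ∃ m, minO l none = some m := by
  cases l with
  | nil => exact absurd rfl h
  | cons c t => exact Option.isSome_iff_exists.1 (minO_isSome t c)

theorem foldB_eq (l : List Int) (acc : Option Int)
    (hb : ∀ a ∈ l, nv2 a.natAbs < 2 ^ 40) :
    l.foldl
      (fun best a =>
        if a ≠ 0 then
          let v := v2Loop (2 ^ 40) a 0
          match best with
          | none => some v
          | some b => if v < b then some v else some b
        else best) acc
      = minO ((l.filter (fun a => a ≠ 0)).map iv2) acc := by
  induction l generalizing acc with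
  | nil => simp [minO]
  | cons a l ih =>
    rw [List.foldl_cons]
    by_cases ha : a = 0
    · subst ha
      simp only [ne_eq, not_true_eq_false, if_false, List.filter_cons]
      rw [ih _ (fun x hx => hb x (by simp [hx]))]
      simp
    · have hv : v2Loop (2 ^ 40) a 0 = iv2 a := by
        rw [v2Loop_eq _ _ _ ha (hb a (by simp))]; ring
      rw [List.filter_cons_of_pos (by simpa using ha), List.map_cons]
      rw [ih _ (fun x hx => hb x (by simp [hx]))]
      simp only [ne_eq, ha, not_false_eq_true, if_true, hv]
      rfl

theorem pyRead (A : List Int) (i : Nat) :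
    ((PySem.List.pyGet? A (i : Int)).getD 0) = A.getD i 0 := by
  simp [PySem.List.pyGet?_natCast, List.getD]

theorem getD_eq (A : List Int) (i : Nat) (h : i < A.length) : A.getD i 0 = A[i] := by
  simp [List.getD, List.getElem?_eq_getElem h]

theorem onePass_none (d N : Nat) : ∀ (i : Nat) (A : List Int), N - i = d →
    (∃ j, i ≤ j ∧ j < N ∧ ¬ ((A.getD j 0).natAbs % 2 = 0)) →
    solveOnePass A N i = none := by
  induction d with
  | zero => intro i A hd ⟨j, h1, h2, _⟩; omega
  | succ d ih =>
    intro i A hd ⟨j, h1, h2, hodd⟩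
    have hiN : i < N := by omega
    rw [solveOnePass, if_pos hiN, pyRead]
    by_cases he : (A.getD i 0).natAbs % 2 = 0
    · rw [if_pos ((mod_two_zero_iff _).2 he)]
      have hji : j ≠ i := by rintro rfl; exact hodd he
      exact ih (i + 1) _ (by omega)
        ⟨j, by omega, h2, by rwa [List.getD, List.getElem?_set_ne (by omega), ← List.getD]⟩
    · rw [if_neg (fun hc => he ((mod_two_zero_iff _).1 hc))]

theorem onePass_some (d N : Nat) : ∀ (i : Nat) (A : List Int), N - i = d → i ≤ N →
    N ≤ A.length →
    (∀ j, i ≤ j → j < N → (A.getD j 0).natAbs % 2 = 0) →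
    solveOnePass A N i =
      some (A.take i ++ ((A.drop i).take (N - i)).map pvHalve ++ A.drop N) := by
  induction d with
  | zero =>
    intro i A hd hiN _ _
    have : i = N := by omega
    subst this
    rw [solveOnePass, if_neg (by omega)]
    simp
  | succ d ih =>
    intro i A hd hiN hlen hev
    have hiN' : i < N := by omega
    have hil : i < A.length := by omega
    rw [solveOnePass, if_pos hiN', pyRead]
    rw [if_pos ((mod_two_zero_iff _).2 (hev i le_rfl hiN'))]
    have hset : A.set i (PySem.Int.floordiv (A.getD i 0) 2)
        = A.take i ++ pvHalve A[i] :: A.drop (i + 1) := by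
      rw [List.set_eq_take_append_cons_drop, if_pos hil]
      rw [getD_eq A i hil]
      rfl
    rw [ih (i + 1) _ (by omega) (by omega) (by simpa using hlen) ?_]
    · congr 1
      rw [hset]
      have hti : (A.take i).length = i := by simp; omega
      rw [List.take_append, List.drop_append, List.drop_append, hti,
          List.take_of_length_le (by omega),
          List.drop_eq_nil_of_le (by omega : (A.take i).length ≤ i + 1),
          List.drop_eq_nil_of_le (by omega : (A.take i).length ≤ N),
          show i + 1 - i = 1 by omega]
      simp only [List.take_succ_cons, List.take_zero, List.drop_succ_cons, List.drop_zero,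
        List.nil_append]
      rw [show N - i = N - i - 1 + 1 by omega]
      simp only [List.drop_succ_cons, List.drop_drop]
      rw [show i + 1 + (N - i - 1) = N by omega, show N - (i + 1) = N - i - 1 by omega]
      simp [List.append_assoc]
      conv_rhs => rw [List.drop_eq_getElem_cons (l := List.map pvHalve A) (by simpa using hil),
        List.take_succ_cons, List.getElem_map]
      simp
    · intro j hj1 hj2
      rw [hset]
      have hti : (A.take i).length = i := by simp; omega
      simp only [List.getD, List.getElem?_append_right (by omega : (A.take i).length ≤ j), hti]
      rw [show j - i = (j - i - 1) + 1 by omega]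
      simp only [List.getElem?_cons_succ, List.getElem?_drop]
      have := hev j (by omega) hj2
      simp only [List.getD] at this
      rwa [show i + 1 + (j - i - 1) = j by omega]

theorem vList_nonneg {N : Nat} {A : List Int} {x : Int} (h : x ∈ vList N A) : 0 ≤ x := by
  unfold vList at h
  obtain ⟨a, _, rfl⟩ := List.mem_map.1 h
  exact iv2_nonneg a

theorem mem_take_of_lt {A : List Int} {j N : Nat} (hj : j < N) (hl : j < A.length) :
    A[j] ∈ A.take N := by
  have h3 : j < (A.take N).length := by simp; omega
  have : (A.take N)[j] = A[j] := List.getElem_take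
  exact this ▸ List.getElem_mem h3

theorem minO_zero {N : Nat} {A : List Int} {j : Nat} (hj : j < N) (hl : j < A.length)
    (hodd : ¬ (A[j].natAbs % 2 = 0)) :
    minO (vList N A) none = some 0 := by
  have hne : A[j] ≠ 0 := by intro h; rw [h] at hodd; simp at hodd
  have hmem : (0 : Int) ∈ vList N A := by
    unfold vList
    refine List.mem_map.2 ⟨A[j], List.mem_filter.2 ⟨mem_take_of_lt hj hl, by simpa using hne⟩, ?_⟩
    exact iv2_odd hodd
  obtain ⟨c, l, hc⟩ : ∃ c l, vList N A = c :: l := by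
    cases h : vList N A with
    | nil => rw [h] at hmem; simp at hmem
    | cons c l => exact ⟨c, l, rfl⟩
  have h1 : (minO (vList N A) none).isSome := by
    rw [hc]; exact minO_isSome l c
  obtain ⟨m, hm⟩ := Option.isSome_iff_exists.1 h1
  obtain ⟨hle, -⟩ := minO_le _ _ _ hm
  have hm0 : 0 ≤ m := by
    rcases minO_mem _ _ _ hm with h | h
    · exact vList_nonneg h
    · simp at h
  have := hle 0 hmem
  rw [hm, show m = 0 by omega]

theorem take_even {N : Nat} {A : List Int}
    (hev : ∀ j, j < N → (A.getD j 0).natAbs % 2 = 0) {a : Int} (ha : a ∈ A.take N) :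
    a.natAbs % 2 = 0 := by
  obtain ⟨j, hj, rfl⟩ := List.mem_iff_getElem.1 ha
  have hjl : j < A.length := by simp at hj; omega
  have hjN : j < N := by simp at hj; omega
  have := hev j hjN
  rw [getD_eq A j hjl] at this
  rwa [List.getElem_take]

theorem vList_halve {N : Nat} {A : List Int} (hlen : N ≤ A.length)
    (hev : ∀ j, j < N → (A.getD j 0).natAbs % 2 = 0) :
    vList N ((A.take N).map pvHalve ++ A.drop N) = (vList N A).map (fun x => x - 1) := by
  unfold vList
  have hlt : ((A.take N).map pvHalve).length = N := by simp; omega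
  rw [List.take_append, List.take_of_length_le (le_of_eq hlt), hlt]
  rw [show N - N = 0 by omega, List.take_zero, List.append_nil]
  rw [List.filter_map]
  have hfil : (A.take N).filter ((fun a => decide (a ≠ 0)) ∘ pvHalve)
      = (A.take N).filter (fun a => decide (a ≠ 0)) := by
    apply List.filter_congr
    intro a ha
    have hae := take_even hev ha
    by_cases h0 : a = 0
    · subst h0; simp [pvHalve, PySem.Int.floordiv]
    · have h2 : pvHalve a ≠ 0 := halve_ne_zero h0 hae
      simp [h2, h0]
  rw [hfil, List.map_map, List.map_map]
  apply List.map_congr_left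
  intro a ha
  have hae := take_even hev (List.mem_filter.1 ha).1
  have h0 : a ≠ 0 := by simpa using (List.mem_filter.1 ha).2
  exact iv2_even h0 hae

theorem solveGo_eq (f : Nat) : ∀ (N : Nat) (A : List Int) (cnt m : Int),
    N ≤ A.length → minO (vList N A) none = some m → m.toNat < f →
    solveGo f N A cnt = cnt + m := by
  induction f with
  | zero => intro _ _ _ _ _ _ h; omega
  | succ f ih =>
    intro N A cnt m hlen hm hf
    by_cases hodd : ∃ j, j < N ∧ ¬ ((A.getD j 0).natAbs % 2 = 0)
    · obtain ⟨j, hjN, hj⟩ := hodd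
      have hjl : j < A.length := by omega
      rw [getD_eq A j hjl] at hj
      have h0 : minO (vList N A) none = some 0 := minO_zero hjN hjl hj
      rw [hm] at h0
      simp at h0
      rw [solveGo, onePass_none (N - 0) N 0 A rfl
        ⟨j, by omega, hjN, by rwa [getD_eq A j hjl]⟩]
      show cnt = cnt + m
      omega
    · push Not at hodd
      have hev : ∀ j, j < N → (A.getD j 0).natAbs % 2 = 0 := fun j hj => hodd j hj
      have hsome := onePass_some (N - 0) N 0 A rfl (by omega) hlen (fun j _ hj => hev j hj)
      simp only [List.take_zero, List.drop_zero, Nat.sub_zero, List.nil_append] at hsome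
      rw [solveGo, hsome]
      have hm1 : 1 ≤ m := by
        rcases minO_mem _ _ _ hm with h | h
        · unfold vList at h
          obtain ⟨a, ha, rfl⟩ := List.mem_map.1 h
          have hae := take_even hev (List.mem_filter.1 ha).1
          have h0 : a ≠ 0 := by simpa using (List.mem_filter.1 ha).2
          have hh : nv2 a.natAbs = nv2 (a.natAbs / 2) + 1 := nv2_even (by omega) hae
          show (1:Int) ≤ (nv2 a.natAbs : Int)
          omega
        · simp at h
      have hm' : minO (vList N ((A.take N).map pvHalve ++ A.drop N)) none = some (m - 1) := by
        rw [vList_halve hlen hev]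
        have := minO_map_sub_one (vList N A) none
        simp only [Option.map_none] at this
        rw [this, hm]
        rfl
      show solveGo f N ((A.take N).map pvHalve ++ A.drop N) (cnt + 1) = cnt + m
      rw [ih N _ (cnt + 1) (m - 1) (by simp; omega) hm' (by omega)]
      ring

-- ===== VERDICT (by name: the statement is the Claim_ definition above) =====
theorem solve_spec : Claim_equal_solve := by
  intro N A hdom hpre
  unfold Spec_solve
  obtain ⟨hN1, hcase⟩ := hpre
  have hbound : ∀ a ∈ A, nv2 a.natAbs < 2 ^ 40 := by
    intro a ha
    have hd : pvDomInt a = true := by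
      unfold Dom_solve at hdom
      simp only [Bool.and_eq_true, List.all_eq_true] at hdom
      exact hdom.2 a ha
    unfold pvDomInt at hd
    simp only [decide_eq_true_eq] at hd
    have h1 : a.natAbs ≤ 2147483648 := by omega
    have h2 := nv2_le a.natAbs
    omega
  have haltB : solve_alt N A = (minO (vList N.toNat A) none).getD 0 := by
    unfold solve_alt
    rw [PySem.List.slice_to A (by omega), foldB_eq _ _
      (fun a ha => hbound a (List.mem_of_mem_take ha))]
    rfl
  rcases hcase with ⟨hlen, a, ha, hnz⟩ | ⟨hlen, a, ha, hodd⟩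
  · have hn : N.toNat ≤ A.length := by omega
    have hmem : iv2 a ∈ vList N.toNat A := by
      unfold vList
      exact List.mem_map.2 ⟨a, List.mem_filter.2 ⟨ha, by simpa using hnz⟩, rfl⟩
    obtain ⟨m, hm⟩ := minO_some_of_ne_nil (List.ne_nil_of_mem hmem)
    have hm0 : 0 ≤ m := by
      rcases minO_mem _ _ _ hm with h | h
      · exact vList_nonneg h
      · simp at h
    have hmle : m ≤ iv2 a := (minO_le _ _ _ hm).1 _ hmem
    have hia : iv2 a < ((2:Int) ^ 40) := by
      unfold iv2
      have := hbound a (List.mem_of_mem_take ha)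
      push_cast
      omega
    unfold solve
    rw [solveGo_eq _ _ _ _ _ hn hm (by omega), haltB, hm]
    simp
  · have hjn : A.length ≤ N.toNat := by omega
    obtain ⟨j, hjl, rfl⟩ := List.mem_iff_getElem.1 ha
    have hoddn : ¬ (A[j].natAbs % 2 = 0) := by omega
    have h0 : minO (vList N.toNat A) none = some 0 := minO_zero (by omega) hjl hoddn
    rw [haltB, h0]
    unfold solve
    rw [show (2 ^ 40 : Nat) = 1099511627775 + 1 from by norm_num, solveGo,
      onePass_none (N.toNat - 0) N.toNat 0 A rfl ⟨j, by omega, by omega, by rwa [getD_eq A j hjl]⟩]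
    rfl
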